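/-
  THE CONTRACTS OF THE CODEBOOK FUNCTIONS (c/stb_vorbis_fixed.c; design/CONTRACTS.md entries 53, 55–59, 83, 86, 87, 90, 95, 101):
  the helpers that BUILD a codebook at setup time, and the functions that DECODE with one.
  Predicates: Vorbis/Codebook/** (`CodebookOK`, `Codebook.K1 … K6`, `K3t`, `K7at`, `CNT`, `CNT'`, `VAL`, `ZV`, `DecodeRawResult`),
  Vorbis/Bits.lean (`Bits`, `ReaderPost`), Vorbis/ResidueMapping/DecodeResidue.lean (`InterAt`); the bit reader's Specs and the
  common precondition `ReaderPre` are S2's (Vorbis/Spec/Reader.lean); `bit_reverse`, `include_in_sort`, `ilog` are the pilot's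
  (Vorbis/Spec/Leaves2.lean), libm Vorbis/Spec/Libm.lean, `qsort` Vorbis/Spec/LibcSort.lean.

  GHOST PARAMETERS
      others frames          the live objects of the shadow invariant (`ShadowPre others frames u`); THE LIVE SET of every clause
                             below is `Live (stackObjs frames ++ others)` (Asan/Objects.lean), as in S1's and S2's Specs
      Blk                    "is an allocated block" (Vorbis/Blocks.lean): the SHAPE clauses of the codebook predicates
      len                    the length of the input (`Bits Blk len mem f`): decode-time functions only

  SETUP TIME (called by start_decoder's codebook loop, `f = &p`; the object `*f` does not occur: these functions get `c` only)
      float32_unpack.spec, lookup1_values.spec      others frames            floats opaque; NOTHING is promised about a result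
      add_entry.spec                                others frames            the 1 (dense) or 3 (sparse) cells as `Site`s
      compute_accelerated_huffman.spec              others frames Blk        K1 K2 K3 K4 → K5; writes `fast_huffman` only
      compute_codewords.spec                        others frames Blk        PROTECTED FRAME (`Vorbis.Frames.compute_codewords`);
                                                                             K7at is the hard precondition (`available[32]`)
      compute_sorted_huffman.spec                   others frames Blk        ZV → ZV (= K4c); segments: `SortedHuffman.At…`
  DECODE TIME (called by vorbis_decode_packet_rest, decode_residue; `f` = rdi, `c` = rsi)
      BookPre others frames Blk len u               the common precondition: S2's `ReaderPre`, `BlkOK`, the struct at `c` inside an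
                                                    allocated block, `CodebookOK`, `BookApart` (what `*f` must not meet)
      codebook_decode_scalar_raw.spec               DecodeRaw; segments: `ScalarRaw.At…`
      codebook_decode_start.spec                    −1, or an index and then `lookup_type = 2`
      codebook_decode.spec, codebook_decode_step.spec, residue_decode.spec       + the window of floats they add to
      codebook_decode_deinterleave_repeat.spec      `InterAt` is its pre, loop invariant and result-1 post; it writes ITS OWN
                                                    STACK ARGUMENT slot `[rsp + 16, rsp + 20)`; segments: `Deint.At…`
  Every decode-time footprint inside `*f` is S2's `Reader.winsBits f` (acc, valid_bits, error and prep_huffman's windows): all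
  inside the decode-time holes of `*f` (`Reader.inHole_of_mem`).

  HELPERS FOR THE WORKERS (proved here)
      blk_byte_where, live_byte_where, site_where, blk_where      where a live byte / a `Site` / an allocated block is: above the text,
                                     in the data space, off the own stack (ONE range fact for `u_omega`)
      BookApart.frame, BookPre.carry `BookPre` again after a callee / a batch of stores that stayed away from the book
      FloatWindow.sub                a part of a window of floats; stepBytes_fits, step_product_lt: residue_decode's strided call
      sext32_shl2_add, sext32_mul4_add, sext32_add      the `toNat` of the element addresses the walker builds (`movsxd ; shl / lea ; add`)
      add_entry.spec_writes_dense / _sparse, compute_codewords.spec_writes_…, compute_sorted_huffman.wins_…      the `if` footprints, per case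
      Mid                            the frame facts every cut-point assertion of a segmented function shares (six pushes)
  SEGMENT FAMILIES: Vorbis/Spec/Codebook/{ScalarRaw,SortedHuffman,Deint}.lean (assertions `At…`, one `Claim<k>` per segment; the
  unit statements are generated by S3's tools/mkseg.py; the COMPOSITION statements are proved in the test files).

  `Spec.frame` = CONTRACTS' "worst-case depth with callees" (checked against the disassembly: own frame + 8 + the deepest callee).
-/
import Vorbis.Spec.Reader
import Vorbis.Spec.Leaves2
import Vorbis.Spec.Libm
import Vorbis.Spec.LibcSort
import Vorbis.ResidueMapping
namespace Vorbis.Spec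
open X86 X86.User Asan

/-! ### Vocabulary of this file -/

/-- **Where an allocated block is**, bytewise, for the live set of the shadow invariant: above the image's text, inside the data
space, and off the stack below `top` (the function's own frame and everything it pushes). The arithmetic behind "a store to my
stack / a push does not change this block". -/
theorem blk_byte_where {others : List Obj} {frames : List (Nat × FrameLayout)} {Blk : Block → Prop} {top : Nat} {mem : Mem}
    (hL : BlkLive Blk (Live (stackObjs frames ++ others))) (hinv : ShadowInv others frames top mem)
    (hoff : ∀ o, o ∈ others → L.textHi ≤ o.base) {B : Block} (hB : Blk B) (x : Nat) (h1 : B.base ≤ x)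
    (h2 : x < B.base + B.size) :
    L.textHi ≤ x ∧ x < 0xC00000 ∧ (top ≤ x ∨ x < 0x700000 ∨ 0x800000 ≤ x) := by
  have hlive : InLive (Live (stackObjs frames ++ others)) B.base B.size := hL B hB
  have hx := hlive (x - B.base) (by omega)
  have e : B.base + (x - B.base) = x := by omega
  rw [e] at hx
  obtain ⟨o, ho, hb⟩ := hx
  unfold Obj.Bytes at hb
  have hl : LiveIn others frames x 1 := ⟨o, ho, by omega, by omega⟩
  have := hl.where_ hinv hoff (by decide)
  have e : L.textHi = 0x119d40 := rfl
  omega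

/-- One live byte: where it is. -/
theorem live_byte_where {others : List Obj} {frames : List (Nat × FrameLayout)} {top : Nat} {mem : Mem}
    (hinv : ShadowInv others frames top mem) (hoff : ∀ o, o ∈ others → L.textHi ≤ o.base) {x : Nat}
    (hx : Live (stackObjs frames ++ others) x) :
    L.textHi ≤ x ∧ x < 0xC00000 ∧ (top ≤ x ∨ x < 0x700000 ∨ 0x800000 ≤ x) := by
  obtain ⟨o, ho, hb⟩ := hx
  unfold Obj.Bytes at hb
  have hl : LiveIn others frames x 1 := ⟨o, ho, by omega, by omega⟩
  have := hl.where_ hinv hoff (by decide)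
  have e : L.textHi = 0x119d40 := rfl
  omega

/-- **Where a site is**, as ONE range fact for `u_omega` (the analogue of `LiveIn.where_` for the bytewise `Site`; found by the
validator of add_entry): above the text, inside the data space, off the stack below `top`. `htop` (the stack pointer is above the
bottom of the stack region) comes from `AtEntry.room` with a non-zero frame. -/
theorem site_where {others : List Obj} {frames : List (Nat × FrameLayout)} {top : Nat} {mem : Mem}
    (hinv : ShadowInv others frames top mem) (hoff : ∀ o, o ∈ others → L.textHi ≤ o.base) (htop : 0x700000 < top)
    {a n : Nat} (hs : Site (Live (stackObjs frames ++ others)) a n) :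
    L.textHi ≤ a ∧ a + n ≤ 0xC00000 ∧ (top ≤ a ∨ a + n ≤ 0x700000 ∨ 0x800000 ≤ a) := by
  have hn : 1 ≤ n := by
    obtain ⟨B, _, _, h⟩ := hs
    exact h
  have hl := hs.inLive
  have h0 := hl 0 (by omega)
  have h1 := hl (n - 1) (by omega)
  have w0 := live_byte_where hinv hoff h0
  have w1 := live_byte_where hinv hoff h1
  by_cases hmid : a < 0x700000 ∧ 0x700000 < a + n
  · have h2 := hl (0x700000 - a) (by omega)
    have w2 := live_byte_where hinv hoff h2
    have e : a + (0x700000 - a) = 0x700000 := by omega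
    rw [e] at w2
    omega
  · omega

/-- The same for a non-empty allocated block (`Blk ⟨p, n⟩` of a SHAPE clause, `BlkLive` from the precondition). -/
theorem blk_where {others : List Obj} {frames : List (Nat × FrameLayout)} {Blk : Block → Prop} {top : Nat} {mem : Mem}
    (hL : BlkLive Blk (Live (stackObjs frames ++ others))) (hinv : ShadowInv others frames top mem)
    (hoff : ∀ o, o ∈ others → L.textHi ≤ o.base) (htop : 0x700000 < top) {B : Block} (hB : Blk B) (hn : 1 ≤ B.size) :
    L.textHi ≤ B.base ∧ B.base + B.size ≤ 0xC00000 ∧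
      (top ≤ B.base ∨ B.base + B.size ≤ 0x700000 ∨ 0x800000 ≤ B.base) :=
  site_where hinv hoff htop (Site.of_blk hL hB (Nat.le_refl _) (Nat.le_refl _) hn)

/-! ### The element addresses the walker builds (found by the validator of add_entry): with the `toNat` equation of the
expression in the context BEFORE the walk, every address side goal closes by itself -/

/-- `movsxd r, r32 ; shl r, 2 ; add r, [ptr]`: the address of element `x` (a non-negative int) of an array of words at `cw`. -/
theorem sext32_shl2_add (x : Word) (cw : Nat) (hx : x.toNat % 2 ^ 32 < 2 ^ 31) (hcw : cw + 4 * (x.toNat % 2 ^ 32) < 2 ^ 64) :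
    (Word.ofBV (BitVec.signExtend 64 (Word.part .w32 x)) <<< 2 + UInt64.ofNat cw).toNat = cw + 4 * (x.toNat % 2 ^ 32) := by
  rw [ofBV_signExtend64, part32_toInt]
  have hs : sint32 (x.toNat % 2 ^ 32) = ((x.toNat % 2 ^ 32 : Nat) : Int) := by
    unfold sint32
    rw [if_pos (by omega)]
  rw [hs, word_nonneg _ (Int.natCast_nonneg _), Int.toNat_natCast]
  clear hs
  generalize x.toNat % 2 ^ 32 = n at *
  unfold addr
  rw [UInt64.toNat_add, UInt64.toNat_shiftLeft, UInt64.toNat_ofNat', UInt64.toNat_ofNat']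
  have e2 : (2 : UInt64).toNat % 64 = 2 := by decide
  rw [e2]
  simp only [Nat.shiftLeft_eq, Nat.reducePow]
  omega

/-- `movsxd r, r32 ; lea r', [r*4]`, then `add r', ptr`: the same element address, in the `* 4` spelling. -/
theorem sext32_mul4_add (x : Word) (cw : Word) (hx : x.toNat % 2 ^ 32 < 2 ^ 31) (hcw : cw.toNat + 4 * (x.toNat % 2 ^ 32) < 2 ^ 64) :
    (Word.ofBV (BitVec.signExtend 64 (Word.part .w32 x)) * 4 + cw).toNat = cw.toNat + 4 * (x.toNat % 2 ^ 32) := by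
  rw [ofBV_signExtend64, part32_toInt]
  have hs : sint32 (x.toNat % 2 ^ 32) = ((x.toNat % 2 ^ 32 : Nat) : Int) := by
    unfold sint32
    rw [if_pos (by omega)]
  rw [hs, word_nonneg _ (Int.natCast_nonneg _), Int.toNat_natCast]
  clear hs
  generalize x.toNat % 2 ^ 32 = n at *
  unfold addr
  rw [UInt64.toNat_add, UInt64.toNat_mul, UInt64.toNat_ofNat']
  have e4 : (4 : UInt64).toNat = 4 := by decide
  rw [e4]
  omega

/-- `movsxd r, r32 ; add r, ptr`: the address of byte `x` of an array at `cl`. -/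
theorem sext32_add (x : Word) (cl : Word) (hx : x.toNat % 2 ^ 32 < 2 ^ 31) (hcl : cl.toNat + x.toNat % 2 ^ 32 < 2 ^ 64) :
    (Word.ofBV (BitVec.signExtend 64 (Word.part .w32 x)) + cl).toNat = cl.toNat + x.toNat % 2 ^ 32 := by
  rw [ofBV_signExtend64, part32_toInt]
  have hs : sint32 (x.toNat % 2 ^ 32) = ((x.toNat % 2 ^ 32 : Nat) : Int) := by
    unfold sint32
    rw [if_pos (by omega)]
  rw [hs, word_nonneg _ (Int.natCast_nonneg _), Int.toNat_natCast]
  clear hs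
  generalize x.toNat % 2 ^ 32 = n at *
  unfold addr
  rw [UInt64.toNat_add, UInt64.toNat_ofNat']
  omega

/-! ### `float32_unpack`, `lookup1_values`: floats only -/

/-- **`float32_unpack(edi = x)`** (CONTRACTS 95): any `x`. Integer operations on the bits, `cvtsi2sd` of a 21-bit mantissa,
`ldexp(·, exp − 788)`; the result (xmm0) is opaque. No memory access besides its own 40 bytes of stack (`sub rsp, 8`, the return
address of its call, `ldexp`'s 24) and constants of `.rodata` by RIP-relative operands; no shadow byte is written. -/
def float32_unpack.spec (others : List Obj) (frames : List (Nat × FrameLayout)) : Spec where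
  pre u :=
    ShadowPre others frames u
  post u v :=
    ShadowUntouched u.mem v.mem
  frame := 40
  writes _ := []

@[vspec] theorem float32_unpack.spec_frame (others : List Obj) (frames : List (Nat × FrameLayout)) :
    (float32_unpack.spec others frames).frame = 40 := id rfl

@[vspec] theorem float32_unpack.spec_writes (others : List Obj) (frames : List (Nat × FrameLayout)) (u : State) :
    (float32_unpack.spec others frames).writes u = [] := id rfl

/-- **`lookup1_values(edi = entries, esi = dim)`** (CONTRACTS 101; FIX 14, FIX 18): ANY two values (`log(entries) / dim` is a
float division). eax is AN ARBITRARY INT to the proof: the one `cvttsd2si` (0x10babe) is executed after `comisd` tests on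
opaque floats, the four `return -1` stubs give −1; the caller (start_decoder, FIX 17) rejects `< 0`, `> entries` and `= 0`
itself, so the contract promises nothing about eax. No memory access besides its own 104 bytes of stack (two pushes,
`sub rsp, 18H`, a return address, `pow`'s 56); no shadow byte is written. -/
def lookup1_values.spec (others : List Obj) (frames : List (Nat × FrameLayout)) : Spec where
  pre u :=
    ShadowPre others frames u
  post u v :=
    ShadowUntouched u.mem v.mem
  frame := 104
  writes _ := []

@[vspec] theorem lookup1_values.spec_frame (others : List Obj) (frames : List (Nat × FrameLayout)) :
    (lookup1_values.spec others frames).frame = 104 := id rfl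

@[vspec] theorem lookup1_values.spec_writes (others : List Obj) (frames : List (Nat × FrameLayout)) (u : State) :
    (lookup1_values.spec others frames).writes u = [] := id rfl

/-! ### `add_entry` -/

/-- The cell `codewords[symbol]` that `add_entry` stores to for a dense book. -/
def add_entry.denseCell (u : State) : Block :=
  ⟨Codebook.codewords u.mem (u.reg .rdi).toNat + 4 * argU32 (u.reg .rdx), 4⟩

/-- The cell `codewords[count]` that `add_entry` stores to for a sparse book. -/
def add_entry.cwCell (u : State) : Block :=
  ⟨Codebook.codewords u.mem (u.reg .rdi).toNat + 4 * argU32 (u.reg .rcx), 4⟩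

/-- The cell `codeword_lengths[count]` (sparse). -/
def add_entry.lenCell (u : State) : Block :=
  ⟨Codebook.codeword_lengths u.mem (u.reg .rdi).toNat + argU32 (u.reg .rcx), 1⟩

/-- The cell `values[count]` (sparse). -/
def add_entry.valCell (u : State) : Block :=
  ⟨(u.reg .r9).toNat + 4 * argU32 (u.reg .rcx), 4⟩

/-- **The precondition of `add_entry(rdi = c, esi = huff_code, edx = symbol, ecx = count, r8d = len, r9 = values)`**. -/
structure AddEntryPre (others : List Obj) (frames : List (Nat × FrameLayout)) (u : State) : Prop where
  shadow : ShadowPre others frames u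
  /-- `Live(c, 2120)`: the struct at `c` lies inside one live block (four check sites at `c + 1BH`, `c + 28H`, `c + 8`) -/
  book : Site (Live (stackObjs frames ++ others)) (u.reg .rdi).toNat Off.sizeof.Codebook
  /-- dense: `0 ≤ symbol` (it is sign-extended: `movsxd rbp, ebp`) and the word `codewords[symbol]` is live (K3n) -/
  dense : Codebook.sparse u.mem (u.reg .rdi).toNat = 0 →
    argU32 (u.reg .rdx) < 2 ^ 31 ∧
    Site (Live (stackObjs frames ++ others)) (add_entry.denseCell u).base 4
  /-- sparse: `0 ≤ count`; `codewords[count]` (the temp block), `codeword_lengths[count]`, `values[count]` are live; the first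
  two stores do not reach the struct (`c->codeword_lengths` is re-read after the first); the three cells do not meet -/
  sparse : Codebook.sparse u.mem (u.reg .rdi).toNat ≠ 0 →
    argU32 (u.reg .rcx) < 2 ^ 31 ∧
    Site (Live (stackObjs frames ++ others)) (add_entry.cwCell u).base 4 ∧
    Site (Live (stackObjs frames ++ others)) (add_entry.lenCell u).base 1 ∧
    Site (Live (stackObjs frames ++ others)) (add_entry.valCell u).base 4 ∧
    Apart [Codebook.block (u.reg .rdi).toNat, add_entry.cwCell u, add_entry.lenCell u, add_entry.valCell u]

/-- **The postcondition of `add_entry`**: dense `codewords[symbol] = huff_code`; sparse `codewords[count] = huff_code`,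
`codeword_lengths[count] = (uint8) len`, `values[count] = symbol`. Nothing else is written (the footprint). -/
structure AddEntryPost (u v : State) : Prop where
  untouched : ShadowUntouched u.mem v.mem
  dense : Codebook.sparse u.mem (u.reg .rdi).toNat = 0 →
    v.mem.u32 (add_entry.denseCell u).base = argU32 (u.reg .rsi)
  sparse : Codebook.sparse u.mem (u.reg .rdi).toNat ≠ 0 →
    v.mem.u32 (add_entry.cwCell u).base = argU32 (u.reg .rsi) ∧
    v.mem.u8 (add_entry.lenCell u).base = (u.reg .r8).toNat % 256 ∧
    v.mem.u32 (add_entry.valCell u).base = argU32 (u.reg .rdx)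

/-- **`add_entry`** (CONTRACTS 86): `Live(c, 2120)`; sparse = 0: `0 ≤ symbol < entries ∧ Block(c.codewords, 4·entries)` — here:
the word `codewords[symbol]` is a live site; sparse ≠ 0: `0 ≤ count < se` and the three blocks — here: the three cells are live
sites, apart from `*c` and from each other. Stack: six pushes, `sub rsp, 18H` (`len` at `[rsp + 4]`, `values` at `[rsp + 8]`), the
return address of its check calls, that routine's worst case: 96 bytes. No shadow byte is written. -/
def add_entry.spec (others : List Obj) (frames : List (Nat × FrameLayout)) : Spec where
  pre u := AddEntryPre others frames u
  post u v := AddEntryPost u v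
  frame := 96
  writes u :=
    if Codebook.sparse u.mem (u.reg .rdi).toNat = 0 then [(add_entry.denseCell u).span]
    else [(add_entry.cwCell u).span, (add_entry.lenCell u).span, (add_entry.valCell u).span]

@[vspec] theorem add_entry.spec_frame (others : List Obj) (frames : List (Nat × FrameLayout)) :
    (add_entry.spec others frames).frame = 96 := id rfl

@[vspec] theorem add_entry.spec_writes (others : List Obj) (frames : List (Nat × FrameLayout)) (u : State) :
    (add_entry.spec others frames).writes u =
      if Codebook.sparse u.mem (u.reg .rdi).toNat = 0 then [(add_entry.denseCell u).span]
      else [(add_entry.cwCell u).span, (add_entry.lenCell u).span, (add_entry.valCell u).span] := id rfl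

/-- The footprint of `add_entry` for a dense book, without the `if` (`rw` it before `u_same`). -/
theorem add_entry.spec_writes_dense (others : List Obj) (frames : List (Nat × FrameLayout)) (u : State)
    (h : Codebook.sparse u.mem (u.reg .rdi).toNat = 0) :
    (add_entry.spec others frames).writes u = [(add_entry.denseCell u).span] :=
  if_pos h

/-- The footprint of `add_entry` for a sparse book, without the `if`. -/
theorem add_entry.spec_writes_sparse (others : List Obj) (frames : List (Nat × FrameLayout)) (u : State)
    (h : Codebook.sparse u.mem (u.reg .rdi).toNat ≠ 0) :
    (add_entry.spec others frames).writes u =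
      [(add_entry.cwCell u).span, (add_entry.lenCell u).span, (add_entry.valCell u).span] :=
  if_neg h

/-! ### `compute_accelerated_huffman` -/

/-- **The precondition of `compute_accelerated_huffman(rdi = c)`** (CONTRACTS 83): `Live(c, 2120)`; K2; `Block(codeword_lengths,
N)` (K3n / K3s); sparse = 0: `Block(codewords, 4·entries)`; sparse ≠ 0: `Block(sorted_codewords, 4(se + 1))` (K4's block part;
`codewords` is NULL and not read). It is called after the sorted tables are built and the temp blocks freed: K3 and K4 hold in
their final form. No disjointness is needed: the only stores go INTO the struct (`fast_huffman`, offsets 48 … 2096), the fields it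
re-reads lie outside that window, and the contents of the blocks it loads from do not matter (an entry is stored only under
`z ≤ 1023`, and its value is `i < len`). -/
structure AccelPre (others : List Obj) (frames : List (Nat × FrameLayout)) (Blk : Block → Prop) (u : State) : Prop where
  shadow : ShadowPre others frames u
  live : BlkLive Blk (Live (stackObjs frames ++ others))
  /-- the struct at `c` lies inside an allocated block (the codebooks block) -/
  book : ∃ B, Blk B ∧ B.contains (u.reg .rdi).toNat Off.sizeof.Codebook
  K1 : Codebook.K1 u.mem (u.reg .rdi).toNat
  K2 : Codebook.K2 u.mem (u.reg .rdi).toNat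
  K3 : Codebook.K3 Blk u.mem (u.reg .rdi).toNat
  K4 : Codebook.K4 Blk u.mem (u.reg .rdi).toNat

/-- **`compute_accelerated_huffman`** (CONTRACTS 83). Post K5: `∀ k < 1024: fast_huffman[k] = −1 ∨ 0 ≤ fast_huffman[k] <
min(N, 32767)`. Only `[c + 30H, c + 830H)` is written: every other field of `*c`, hence `N(c)`, K1 – K4, K6 read the same
(`Codebook.SameFields` does not apply — `fast_huffman` is one of its fields —: use the footprint). Stack: six pushes,
`sub rsp, 18H`, a return address, the check routine's worst case (bit_reverse: 0): 96 bytes. No shadow byte is written. -/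
def compute_accelerated_huffman.spec (others : List Obj) (frames : List (Nat × FrameLayout)) (Blk : Block → Prop) : Spec where
  pre u := AccelPre others frames Blk u
  post u v :=
    ShadowUntouched u.mem v.mem ∧
    Codebook.K5 v.mem (u.reg .rdi).toNat
  frame := 96
  writes u := [⟨(u.reg .rdi).toNat + 48, (u.reg .rdi).toNat + 2096⟩]

@[vspec] theorem compute_accelerated_huffman.spec_frame (others : List Obj) (frames : List (Nat × FrameLayout))
    (Blk : Block → Prop) : (compute_accelerated_huffman.spec others frames Blk).frame = 96 := id rfl

@[vspec] theorem compute_accelerated_huffman.spec_writes (others : List Obj) (frames : List (Nat × FrameLayout))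
    (Blk : Block → Prop) (u : State) : (compute_accelerated_huffman.spec others frames Blk).writes u =
      [⟨(u.reg .rdi).toNat + 48, (u.reg .rdi).toNat + 2096⟩] := id rfl

/-! ### `compute_codewords` (a PROTECTED frame: `available[32]`) -/

/-- The blocks `compute_codewords` / `compute_sorted_huffman` work on besides the struct, for the book at `c` in `mem`:
`codewords` (dense: `4·entries` bytes; sparse: the temp block of `4·se` bytes). -/
def cwBlock (mem : Mem) (c : Nat) : Block :=
  ⟨Codebook.codewords mem c, 4 * (Codebook.N mem c).toNat⟩

/-- **The precondition of `compute_codewords(rdi = c, rsi = len, edx = n, rcx = values)`** (CONTRACTS 87). -/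
structure CodewordsPre (others : List Obj) (frames : List (Nat × FrameLayout)) (Blk : Block → Prop) (u : State) : Prop where
  /-- SH4 included: the frame area `[rsp − 296, rsp)` is clean (`StackOK.clean` of the layer: everything below `rsp + 8`) -/
  shadow : ShadowPre others frames u
  live : BlkLive Blk (Live (stackObjs frames ++ others))
  /-- `Live(c, 2120)` -/
  book : ∃ B, Blk B ∧ B.contains (u.reg .rdi).toNat Off.sizeof.Codebook
  K1 : Codebook.K1 u.mem (u.reg .rdi).toNat
  K2 : Codebook.K2 u.mem (u.reg .rdi).toNat
  /-- dense: K3n; sparse: `codeword_lengths` = its final block of `se` bytes, `codewords` = the temp block of `4·se` bytes -/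
  K3t : Codebook.K3t Blk u.mem (u.reg .rdi).toNat
  /-- `n = c.entries` (`0 ≤ n < 2^24` by K1) -/
  n_eq : (argU32 (u.reg .rdx) : Int) = Codebook.entries u.mem (u.reg .rdi).toNat
  /-- `Block(len, n)` (dense: `len = c.codeword_lengths`, K3n; sparse: the temp block `lengths`) -/
  lens : Blk ⟨(u.reg .rsi).toNat, argU32 (u.reg .rdx)⟩
  /-- **L, the hard precondition** (D-18): every `len[j]`, `j < n`, is `≤ 31` or `= 255`: it bounds the index into `available[32]` -/
  k7 : K7at u.mem (u.reg .rsi).toNat (argU32 (u.reg .rdx))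
  /-- sparse: CNT `#{j < n : len[j] ≠ 255} = se` (each `add_entry(…, m++, …)` has `m < se`) and `Block(values, 4·se)` -/
  sparse : Codebook.sparse u.mem (u.reg .rdi).toNat ≠ 0 →
    CNT u.mem (u.reg .rsi).toNat (u.reg .rdi).toNat ∧
    Blk ⟨(u.reg .rcx).toNat, 4 * (Codebook.sorted_entries u.mem (u.reg .rdi).toNat).toNat⟩
  /-- `len[0 .. n)` and the struct are disjoint from everything add_entry writes (`len[·]` is RE-READ unchecked after the calls:
  0x1082a6, 0x108301, 0x108332; add_entry re-reads `c->codeword_lengths`), and add_entry's blocks from each other -/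
  apartDense : Codebook.sparse u.mem (u.reg .rdi).toNat = 0 →
    Apart [Codebook.block (u.reg .rdi).toNat, ⟨(u.reg .rsi).toNat, argU32 (u.reg .rdx)⟩,
      cwBlock u.mem (u.reg .rdi).toNat]
  apartSparse : Codebook.sparse u.mem (u.reg .rdi).toNat ≠ 0 →
    Apart [Codebook.block (u.reg .rdi).toNat, ⟨(u.reg .rsi).toNat, argU32 (u.reg .rdx)⟩,
      cwBlock u.mem (u.reg .rdi).toNat, clBlock u.mem (u.reg .rdi).toNat,
      ⟨(u.reg .rcx).toNat, 4 * (Codebook.sorted_entries u.mem (u.reg .rdi).toNat).toNat⟩]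

/-- **The postcondition of `compute_codewords`**: eax ∈ {0, 1}; the protected frame is unpoisoned again on all three exits, so
the NET effect on the shadow is nil (`ShadowUntouched`: the 24 shadow bytes of the frame were 0 at entry — the clean stack — and
are 0 at exit); eax = 1 and sparse: VAL, `∀ m < se: values[m] < n` (each `values[count] = symbol` has `symbol = k` or `i`, `< n`).
Nothing is promised about the codewords themselves (no reader needs it). -/
structure CodewordsPost (u v : State) : Prop where
  untouched : ShadowUntouched u.mem v.mem
  result : v.reg .rax = 0 ∨ v.reg .rax = 1
  values : v.reg .rax = 1 → Codebook.sparse u.mem (u.reg .rdi).toNat ≠ 0 →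
    VAL v.mem (u.reg .rcx).toNat (Codebook.sorted_entries u.mem (u.reg .rdi).toNat).toNat (argU32 (u.reg .rdx))

/-- The 24 shadow bytes of the protected frame of `compute_codewords` entered with stack pointer `rsp` (= RA): the frame is at
`base = RA − 248`, 192 bytes; the prologue stores `f1 f1 f1 f1` at shadow + 0 and `f3 f3 f3 f3` at shadow + 20, the epilogue 0. -/
def compute_codewords.shadowSpan (u : State) : Span :=
  ⟨0xC00000 + ((u.reg .rsp).toNat - 248) / 8, 0xC00000 + ((u.reg .rsp).toNat - 248) / 8 + 24⟩

/-- **`compute_codewords`** (CONTRACTS 87). PROTECTED FRAME `Vorbis.Frames.compute_codewords` (`available` = `[RA − 216,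
RA − 88)`): `ShadowInv.prologue_ra` after the prologue gives the layer with the frame's object live (the callees memset,
add_entry, bit_reverse are called with `(RA − 248, Vorbis.Frames.compute_codewords) :: frames`), `ShadowInv.epilogue_ra` before
the `ret`. Footprint: what add_entry writes — dense `codewords[0 .. n)`, sparse `codewords[0 .. se)`, `codeword_lengths[0 .. se)`,
`values[0 .. se)` — and the frame's shadow bytes. Stack: six pushes, `sub rsp, F8H`, a return address, add_entry's 96: 400. -/
def compute_codewords.spec (others : List Obj) (frames : List (Nat × FrameLayout)) (Blk : Block → Prop) : Spec where
  pre u := CodewordsPre others frames Blk u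
  post u v := CodewordsPost u v
  frame := 400
  writes u :=
    if Codebook.sparse u.mem (u.reg .rdi).toNat = 0 then
      [(cwBlock u.mem (u.reg .rdi).toNat).span, compute_codewords.shadowSpan u]
    else
      [(cwBlock u.mem (u.reg .rdi).toNat).span, (clBlock u.mem (u.reg .rdi).toNat).span,
       ⟨(u.reg .rcx).toNat, (u.reg .rcx).toNat + 4 * (Codebook.sorted_entries u.mem (u.reg .rdi).toNat).toNat⟩,
       compute_codewords.shadowSpan u]

@[vspec] theorem compute_codewords.spec_frame (others : List Obj) (frames : List (Nat × FrameLayout)) (Blk : Block → Prop) :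
    (compute_codewords.spec others frames Blk).frame = 400 := id rfl

@[vspec] theorem compute_codewords.spec_writes (others : List Obj) (frames : List (Nat × FrameLayout)) (Blk : Block → Prop)
    (u : State) : (compute_codewords.spec others frames Blk).writes u =
      if Codebook.sparse u.mem (u.reg .rdi).toNat = 0 then
        [(cwBlock u.mem (u.reg .rdi).toNat).span, compute_codewords.shadowSpan u]
      else
        [(cwBlock u.mem (u.reg .rdi).toNat).span, (clBlock u.mem (u.reg .rdi).toNat).span,
         ⟨(u.reg .rcx).toNat, (u.reg .rcx).toNat + 4 * (Codebook.sorted_entries u.mem (u.reg .rdi).toNat).toNat⟩,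
         compute_codewords.shadowSpan u] := id rfl

/-- The footprint of `compute_codewords` for a dense book, without the `if`. -/
theorem compute_codewords.spec_writes_dense (others : List Obj) (frames : List (Nat × FrameLayout)) (Blk : Block → Prop)
    (u : State) (h : Codebook.sparse u.mem (u.reg .rdi).toNat = 0) :
    (compute_codewords.spec others frames Blk).writes u =
      [(cwBlock u.mem (u.reg .rdi).toNat).span, compute_codewords.shadowSpan u] :=
  if_pos h

/-- The footprint of `compute_codewords` for a sparse book, without the `if`. -/
theorem compute_codewords.spec_writes_sparse (others : List Obj) (frames : List (Nat × FrameLayout)) (Blk : Block → Prop)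
    (u : State) (h : Codebook.sparse u.mem (u.reg .rdi).toNat ≠ 0) :
    (compute_codewords.spec others frames Blk).writes u =
      [(cwBlock u.mem (u.reg .rdi).toNat).span, (clBlock u.mem (u.reg .rdi).toNat).span,
       ⟨(u.reg .rcx).toNat, (u.reg .rcx).toNat + 4 * (Codebook.sorted_entries u.mem (u.reg .rdi).toNat).toNat⟩,
       compute_codewords.shadowSpan u] :=
  if_neg h

/-! ### `compute_sorted_huffman` -/

/-- `sorted_codewords` of the book: `se + 1` words (the table and the `0xffffffff` sentinel). -/
def scBlock (mem : Mem) (c : Nat) : Block :=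
  ⟨Codebook.sorted_codewords mem c, 4 * ((Codebook.sorted_entries mem c).toNat + 1)⟩

/-- **The precondition of `compute_sorted_huffman(rdi = c, rsi = lengths, rdx = values)`** (CONTRACTS 90). -/
structure SortedHuffmanPre (others : List Obj) (frames : List (Nat × FrameLayout)) (Blk : Block → Prop) (u : State) :
    Prop where
  shadow : ShadowPre others frames u
  live : BlkLive Blk (Live (stackObjs frames ++ others))
  /-- `Live(c, 2120)`, as an allocated block (the `site_…` lemmas) … -/
  book : ∃ B, Blk B ∧ B.contains (u.reg .rdi).toNat Off.sizeof.Codebook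
  /-- … and inside ONE live object (include_in_sort's precondition) -/
  bookLive : LiveIn others frames (u.reg .rdi).toNat Off.sizeof.Codebook
  K1 : Codebook.K1 u.mem (u.reg .rdi).toNat
  K2 : Codebook.K2 u.mem (u.reg .rdi).toNat
  /-- `se = c.sorted_entries ≥ 1` (the call is under `if (c->sorted_entries)`) -/
  se_pos : 1 ≤ Codebook.sorted_entries u.mem (u.reg .rdi).toNat
  /-- dense: K3n; sparse: `Block(codeword_lengths, se)`, `Block(codewords, 4·se)` (temp) -/
  K3t : Codebook.K3t Blk u.mem (u.reg .rdi).toNat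
  /-- `Block(sorted_codewords, 4(se + 1))`, `Block(sorted_values − 4, 4(se + 1))`, `sorted_values[−1] = −1` -/
  K4 : Codebook.K4 Blk u.mem (u.reg .rdi).toNat
  /-- the `se` records of qsort lie inside ONE live object (qsort's precondition) -/
  scLive : LiveIn others frames (Codebook.sorted_codewords u.mem (u.reg .rdi).toNat)
    (4 * (Codebook.sorted_entries u.mem (u.reg .rdi).toNat).toNat)
  /-- ZV: `∀ x < se: 0 ≤ sorted_values[x] < entries` (true at entry by FIX 7's zero fill) -/
  zv : ZV u.mem (Codebook.sorted_values u.mem (u.reg .rdi).toNat)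
    (Codebook.sorted_entries u.mem (u.reg .rdi).toNat).toNat (Codebook.entries u.mem (u.reg .rdi).toNat)
  /-- `Block(lengths, entries)` (dense: `c.codeword_lengths`; sparse: the temp block) -/
  lens : Blk ⟨(u.reg .rsi).toNat, (Codebook.entries u.mem (u.reg .rdi).toNat).toNat⟩
  /-- dense: `lengths = c.codeword_lengths` and CNT′ `#{j < entries : lengths[j] ≠ 255 ∧ lengths[j] > 10} = se` -/
  dense : Codebook.sparse u.mem (u.reg .rdi).toNat = 0 →
    (u.reg .rsi).toNat = Codebook.codeword_lengths u.mem (u.reg .rdi).toNat ∧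
    CNT' u.mem (u.reg .rsi).toNat (u.reg .rdi).toNat
  /-- sparse: `Block(values, 4·se)` with VAL `∀ i < se: values[i] < entries` -/
  sparse : Codebook.sparse u.mem (u.reg .rdi).toNat ≠ 0 →
    Blk ⟨(u.reg .rdx).toNat, 4 * (Codebook.sorted_entries u.mem (u.reg .rdi).toNat).toNat⟩ ∧
    VAL u.mem (u.reg .rdx).toNat (Codebook.sorted_entries u.mem (u.reg .rdi).toNat).toNat
      (Codebook.entries u.mem (u.reg .rdi).toNat).toNat
  /-- all blocks pairwise disjoint and disjoint from `*c` (the loops re-read `c.entries` / `sorted_entries` / `sparse` / the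
  pointers from `*c` after stores into the blocks) -/
  apartDense : Codebook.sparse u.mem (u.reg .rdi).toNat = 0 →
    Apart [Codebook.block (u.reg .rdi).toNat, clBlock u.mem (u.reg .rdi).toNat,
      cwBlock u.mem (u.reg .rdi).toNat, scBlock u.mem (u.reg .rdi).toNat,
      Codebook.svBlock u.mem (u.reg .rdi).toNat]
  apartSparse : Codebook.sparse u.mem (u.reg .rdi).toNat ≠ 0 →
    Apart [Codebook.block (u.reg .rdi).toNat, clBlock u.mem (u.reg .rdi).toNat,
      cwBlock u.mem (u.reg .rdi).toNat, scBlock u.mem (u.reg .rdi).toNat,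
      Codebook.svBlock u.mem (u.reg .rdi).toNat,
      ⟨(u.reg .rsi).toNat, (Codebook.entries u.mem (u.reg .rdi).toNat).toNat⟩,
      ⟨(u.reg .rdx).toNat, 4 * (Codebook.sorted_entries u.mem (u.reg .rdi).toNat).toNat⟩]

/-- What `compute_sorted_huffman` may write: `sorted_codewords[0 .. se]`, `sorted_values[0 .. se)` (NOT the sentinel word
`sorted_values[−1]`), and for a sparse book `codeword_lengths[0 .. se)`. -/
def compute_sorted_huffman.wins (mem : Mem) (c : Nat) : List Span :=
  [(scBlock mem c).span,
   ⟨Codebook.sorted_values mem c, Codebook.sorted_values mem c + 4 * (Codebook.sorted_entries mem c).toNat⟩] ++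
  (if Codebook.sparse mem c = 0 then [] else [(clBlock mem c).span])

/-- The windows of `compute_sorted_huffman` for a dense book, without the `if`. -/
theorem compute_sorted_huffman.wins_dense (mem : Mem) (c : Nat) (h : Codebook.sparse mem c = 0) :
    compute_sorted_huffman.wins mem c =
      [(scBlock mem c).span,
       ⟨Codebook.sorted_values mem c, Codebook.sorted_values mem c + 4 * (Codebook.sorted_entries mem c).toNat⟩] := by
  unfold compute_sorted_huffman.wins
  rw [if_pos h]
  rfl

/-- The windows of `compute_sorted_huffman` for a sparse book, without the `if`. -/
theorem compute_sorted_huffman.wins_sparse (mem : Mem) (c : Nat) (h : Codebook.sparse mem c ≠ 0) :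
    compute_sorted_huffman.wins mem c =
      [(scBlock mem c).span,
       ⟨Codebook.sorted_values mem c, Codebook.sorted_values mem c + 4 * (Codebook.sorted_entries mem c).toNat⟩,
       (clBlock mem c).span] := by
  unfold compute_sorted_huffman.wins
  rw [if_neg h]
  rfl

/-- **`compute_sorted_huffman`** (CONTRACTS 90). Post: ZV still holds (= K4c; both store sites write an entry number:
`values[i] < entries` by VAL, or `i < len = entries`); `sorted_codewords[0 .. se]` are arbitrary words (no content property is
needed by any reader: the searches are in range by BS alone). No field of `*c` changes; `sorted_values[−1]` is not written (K4's
sentinel survives by the footprint). Stack: six pushes, `sub rsp, 38H`, a return address, qsort's 224: 336 bytes. No shadow byte is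
written. -/
def compute_sorted_huffman.spec (others : List Obj) (frames : List (Nat × FrameLayout)) (Blk : Block → Prop) : Spec where
  pre u := SortedHuffmanPre others frames Blk u
  post u v :=
    ShadowUntouched u.mem v.mem ∧
    ZV v.mem (Codebook.sorted_values u.mem (u.reg .rdi).toNat)
      (Codebook.sorted_entries u.mem (u.reg .rdi).toNat).toNat (Codebook.entries u.mem (u.reg .rdi).toNat)
  frame := 336
  writes u := compute_sorted_huffman.wins u.mem (u.reg .rdi).toNat

@[vspec] theorem compute_sorted_huffman.spec_frame (others : List Obj) (frames : List (Nat × FrameLayout))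
    (Blk : Block → Prop) : (compute_sorted_huffman.spec others frames Blk).frame = 336 := id rfl

@[vspec] theorem compute_sorted_huffman.spec_writes (others : List Obj) (frames : List (Nat × FrameLayout))
    (Blk : Block → Prop) (u : State) : (compute_sorted_huffman.spec others frames Blk).writes u =
      compute_sorted_huffman.wins u.mem (u.reg .rdi).toNat := id rfl

/-! ### Decode time: the common precondition -/

/-- **THE PRECONDITION OF EVERY DECODE THROUGH A CODEBOOK** (`f` = rdi, `c` = rsi; CONTRACTS 53, 56 – 59: "OB1, Bits f, CB0,
CodebookOK c, SH1 – SH4", `c` an element of `f.codebooks`). -/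
structure BookPre (others : List Obj) (frames : List (Nat × FrameLayout)) (Blk : Block → Prop) (len : Nat) (u : State) :
    Prop where
  /-- S2's common precondition: the shadow clause, `BlkLive`, `*f` and the input inside one live object each, `Bits f` -/
  reader : ReaderPre others frames Blk len u
  /-- allocated blocks are equal or disjoint (the pointer equivalences `codewords ≠ NULL ↔ sparse = 0` …) -/
  ok : BlkOK Blk
  /-- CB0 + "an element of `f.codebooks`": the struct at `c` lies inside an allocated block -/
  book : ∃ B, Blk B ∧ B.contains (u.reg .rsi).toNat Off.sizeof.Codebook
  cb : CodebookOK Blk u.mem (u.reg .rsi).toNat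
  apart : BookApart u.mem (u.reg .rdi).toNat (u.reg .rsi).toNat

/-- **`BookPre` AFTER A CALLEE OR A BATCH OF STORES THAT STAYED AWAY FROM THE BOOK**: the state `s` has the same `f` and `c` in
rdi / rsi, the shadow clause (`ShadowPre.call`), `Bits f` in its memory (a reader's post, or `Bits.store_…`), and its memory
differs from that of `u` only inside windows `ws` that meet neither the struct at `c` nor the `sorted_values` block — windows
inside `*f` (`BookApart.book`, `.sv`), a `FloatWindow` (`offBook`, `offSv`), the function's own stack (`blk_byte_where`). How
codebook_decode_start calls codebook_decode_scalar_raw after prep_huffman, residue_decode calls codebook_decode again, the next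
round of codebook_decode_deinterleave_repeat calls codebook_decode_scalar_raw. -/
theorem BookPre.carry {others : List Obj} {frames : List (Nat × FrameLayout)} {Blk : Block → Prop} {len : Nat} {u s : State}
    (h : BookPre others frames Blk len u) (hsh : ShadowPre others frames s) (hrdi : s.reg .rdi = u.reg .rdi)
    (hrsi : s.reg .rsi = u.reg .rsi) (hb : Bits Blk len s.mem (u.reg .rdi).toNat) {ws : List Span}
    (hs : Mem.SameExcept ws u.mem s.mem)
    (hd1 : ∀ w, w ∈ ws → (u.reg .rsi).toNat + Off.sizeof.Codebook ≤ w.lo ∨ w.hi ≤ (u.reg .rsi).toNat)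
    (hd2 : 1 ≤ Codebook.sorted_entries u.mem (u.reg .rsi).toNat → ∀ w, w ∈ ws →
      (Codebook.svBlock u.mem (u.reg .rsi).toNat).base + (Codebook.svBlock u.mem (u.reg .rsi).toNat).size ≤ w.lo ∨
        w.hi ≤ (Codebook.svBlock u.mem (u.reg .rsi).toNat).base) :
    BookPre others frames Blk len s := by
  obtain ⟨B, hB, hin⟩ := h.book
  have hkept : (Codebook.block (u.reg .rsi).toNat).Kept u.mem s.mem :=
    Block.Kept.of_sameExcept hs hd1 (Codebook.block_no_wrap h.ok hB hin)
  have hcb : CodebookOK Blk s.mem (u.reg .rsi).toNat :=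
    h.cb.frame_sameExcept h.ok hB hin hs hd1 hd2
  have hap : BookApart s.mem (u.reg .rdi).toNat (u.reg .rsi).toNat :=
    h.apart.frame (Codebook.SameFields.of_kept hkept)
  refine ⟨h.reader.again hsh hrdi hb, h.ok, ?_, ?_, ?_⟩
  · rw [hrsi]
    exact ⟨B, hB, hin⟩
  · rw [hrsi]
    exact hcb
  · rw [hrdi, hrsi]
    exact hap

/-- The footprint of every decode-time function of this file inside `*f`: `acc`, `valid_bits`, `error` and what prep_huffman
writes — S2's `Reader.winsBits f`, written out (`vspec` rewrites `writes` to numerals). -/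
def bookWins (f : Nat) : List Span :=
  [⟨f + 48, f + 56⟩, ⟨f + 84, f + 96⟩, ⟨f + 136, f + 144⟩, ⟨f + 1484, f + 1749⟩, ⟨f + 1752, f + 1784⟩]

/-- It is S2's list. -/
theorem bookWins_eq (f : Nat) : bookWins f = Reader.winsBits f := id rfl

/-! ### `codebook_decode_scalar_raw`, `codebook_decode_start` -/

/-- **The postcondition of `codebook_decode_scalar_raw`** (CONTRACTS 53; Lemma DecodeRaw): eax = −1 ∨ 0 ≤ eax < N(c) (rax is
the zero-extended eax: `mov eax, r12d`); `Bits f` kept (V1: also from `valid_bits = −1`, which the `else` arms turn into 0), μ not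
increased; `f.error` may be set to 21. -/
structure ScalarRawPost (Blk : Block → Prop) (len : Nat) (u v : State) : Prop where
  untouched : ShadowUntouched u.mem v.mem
  reader : ReaderPost Blk len u.mem v.mem (u.reg .rdi).toNat
  hi : (v.reg .rax).toNat < 2 ^ 32
  result : DecodeRawResult u.mem (u.reg .rsi).toNat (argInt (v.reg .rax))

/-- **`codebook_decode_scalar_raw(rdi = f, rsi = c)`** (CONTRACTS 53; FIX 16, FIX 22). Footprint: `f.acc`, `f.valid_bits`,
`f.error` + prep_huffman's. Stack: six pushes, `sub rsp, 28H`, a return address, prep_huffman's 288: 384 bytes. No shadow byte is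
written. -/
def codebook_decode_scalar_raw.spec (others : List Obj) (frames : List (Nat × FrameLayout)) (Blk : Block → Prop)
    (len : Nat) : Spec where
  pre u := BookPre others frames Blk len u
  post u v := ScalarRawPost Blk len u v
  frame := 384
  writes u := bookWins (u.reg .rdi).toNat

@[vspec] theorem codebook_decode_scalar_raw.spec_frame (others : List Obj) (frames : List (Nat × FrameLayout))
    (Blk : Block → Prop) (len : Nat) : (codebook_decode_scalar_raw.spec others frames Blk len).frame = 384 := id rfl

@[vspec] theorem codebook_decode_scalar_raw.spec_writes (others : List Obj) (frames : List (Nat × FrameLayout))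
    (Blk : Block → Prop) (len : Nat) (u : State) : (codebook_decode_scalar_raw.spec others frames Blk len).writes u =
      [⟨(u.reg .rdi).toNat + 48, (u.reg .rdi).toNat + 56⟩, ⟨(u.reg .rdi).toNat + 84, (u.reg .rdi).toNat + 96⟩,
       ⟨(u.reg .rdi).toNat + 136, (u.reg .rdi).toNat + 144⟩, ⟨(u.reg .rdi).toNat + 1484, (u.reg .rdi).toNat + 1749⟩,
       ⟨(u.reg .rdi).toNat + 1752, (u.reg .rdi).toNat + 1784⟩] := id rfl

/-- **The postcondition of `codebook_decode_start`** (CONTRACTS 56): eax = −1, or `0 ≤ eax < N(c)` and then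
`c.lookup_type = 2` (K6: `lookup_type ∈ {0, 2}`; type 0 takes the `error` arm and returns −1 WITHOUT reading a bit). `Bits f`
kept; μ not increased; `f.error` may be set. -/
structure DecodeStartPost (Blk : Block → Prop) (len : Nat) (u v : State) : Prop where
  untouched : ShadowUntouched u.mem v.mem
  reader : ReaderPost Blk len u.mem v.mem (u.reg .rdi).toNat
  hi : (v.reg .rax).toNat < 2 ^ 32
  result : argInt (v.reg .rax) = -1 ∨
    (0 ≤ argInt (v.reg .rax) ∧ argInt (v.reg .rax) < Codebook.N u.mem (u.reg .rsi).toNat ∧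
      Codebook.lookup_type u.mem (u.reg .rsi).toNat = 2)

/-- **`codebook_decode_start(rdi = f, rsi = c)`** (CONTRACTS 56): the inline DECODE_VQ (= DECODE_RAW: no `sorted_values`
translation), then the `z < 0` test. Stack: five pushes, a return address, codebook_decode_scalar_raw's 384: 432 bytes. -/
def codebook_decode_start.spec (others : List Obj) (frames : List (Nat × FrameLayout)) (Blk : Block → Prop) (len : Nat) :
    Spec where
  pre u := BookPre others frames Blk len u
  post u v := DecodeStartPost Blk len u v
  frame := 432
  writes u := bookWins (u.reg .rdi).toNat

@[vspec] theorem codebook_decode_start.spec_frame (others : List Obj) (frames : List (Nat × FrameLayout))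
    (Blk : Block → Prop) (len : Nat) : (codebook_decode_start.spec others frames Blk len).frame = 432 := id rfl

@[vspec] theorem codebook_decode_start.spec_writes (others : List Obj) (frames : List (Nat × FrameLayout))
    (Blk : Block → Prop) (len : Nat) (u : State) : (codebook_decode_start.spec others frames Blk len).writes u =
      [⟨(u.reg .rdi).toNat + 48, (u.reg .rdi).toNat + 56⟩, ⟨(u.reg .rdi).toNat + 84, (u.reg .rdi).toNat + 96⟩,
       ⟨(u.reg .rdi).toNat + 136, (u.reg .rdi).toNat + 144⟩, ⟨(u.reg .rdi).toNat + 1484, (u.reg .rdi).toNat + 1749⟩,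
       ⟨(u.reg .rdi).toNat + 1752, (u.reg .rdi).toNat + 1784⟩] := id rfl

/-! ### `codebook_decode`, `codebook_decode_step`, `residue_decode`: a window of floats -/

/-- **A window of floats a vector decode adds to**: `n ≥ 1` bytes at `a` inside ONE live block, which meets neither `*f` (the
post keeps `Bits f`) nor the struct at `c` (`c->multiplicands`, `c->sequence_p` … are re-read after every float store). -/
structure FloatWindow (others : List Obj) (frames : List (Nat × FrameLayout)) (mem : Mem) (f c a n : Nat) : Prop where
  site : Site (Live (stackObjs frames ++ others)) a n
  offObj : (Block.mk a n).disjoint (objBlock f)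
  offBook : (Block.mk a n).disjoint (Codebook.block c)
  /-- … nor the `sorted_values` block (K4's sentinel, K4c): residue_decode calls codebook_decode / codebook_decode_step again after
  the float stores of the previous call and must give `CodebookOK c` in the new memory (the caller: `Separated.buf`) -/
  offSv : 1 ≤ Codebook.sorted_entries mem c → (Block.mk a n).disjoint (Codebook.svBlock mem c)

/-- A part of a window of floats is a window of floats (residue_decode's calls: `[offset + k, …) ⊆ [offset, offset + n)`). -/
theorem FloatWindow.sub {others : List Obj} {frames : List (Nat × FrameLayout)} {mem : Mem} {f c a n : Nat}
    (h : FloatWindow others frames mem f c a n) {b k : Nat} (h1 : a ≤ b) (h2 : b + k ≤ a + n) (hk : 1 ≤ k) :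
    FloatWindow others frames mem f c b k := by
  obtain ⟨hs, ho, hb, hv⟩ := h
  refine ⟨hs.sub h1 h2 hk, ?_, ?_, ?_⟩
  · simp only [vblock] at ho ⊢
    omega
  · simp only [vblock] at hb ⊢
    omega
  · intro hse
    have hd := hv hse
    simp only [vblock] at hd ⊢
    omega

/-- `len' = min(len, c.dimensions)` of codebook_decode / codebook_decode_step, as a number (0 when `len ≤ 0`). -/
def decodeLen (mem : Mem) (c : Nat) (len : Int) : Nat :=
  (min len (Codebook.dimensions mem c)).toNat

/-- The common postcondition of the vector decodes: eax = 0 (codebook_decode_start gave −1: no float was written) or 1;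
`Bits f` kept; μ not increased. Float values are opaque. -/
structure VectorPost (Blk : Block → Prop) (len : Nat) (u v : State) : Prop where
  untouched : ShadowUntouched u.mem v.mem
  reader : ReaderPost Blk len u.mem v.mem (u.reg .rdi).toNat
  result : v.reg .rax = 0 ∨ v.reg .rax = 1

/-- **`codebook_decode(rdi = f, rsi = c, rdx = output, ecx = len)`** (CONTRACTS 58): `len` any int (`≤ 0` ⇒ nothing accessed);
with `len' = min(len, c.dimensions)`: the `4·len'` bytes at `output` (if `len' > 0`) lie inside one live block. Footprint:
`output[0 .. len')` and the reader's windows of `*f`. Stack: six pushes, `sub rsp, 18H`, a return address,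
codebook_decode_start's 432: 512 bytes. -/
def codebook_decode.spec (others : List Obj) (frames : List (Nat × FrameLayout)) (Blk : Block → Prop) (len : Nat) : Spec where
  pre u :=
    BookPre others frames Blk len u ∧
    (0 < decodeLen u.mem (u.reg .rsi).toNat (argInt (u.reg .rcx)) →
      FloatWindow others frames u.mem (u.reg .rdi).toNat (u.reg .rsi).toNat (u.reg .rdx).toNat
        (4 * decodeLen u.mem (u.reg .rsi).toNat (argInt (u.reg .rcx))))
  post u v := VectorPost Blk len u v
  frame := 512
  writes u := bookWins (u.reg .rdi).toNat ++
    [⟨(u.reg .rdx).toNat, (u.reg .rdx).toNat + 4 * decodeLen u.mem (u.reg .rsi).toNat (argInt (u.reg .rcx))⟩]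

@[vspec] theorem codebook_decode.spec_frame (others : List Obj) (frames : List (Nat × FrameLayout)) (Blk : Block → Prop)
    (len : Nat) : (codebook_decode.spec others frames Blk len).frame = 512 := id rfl

@[vspec] theorem codebook_decode.spec_writes (others : List Obj) (frames : List (Nat × FrameLayout)) (Blk : Block → Prop)
    (len : Nat) (u : State) : (codebook_decode.spec others frames Blk len).writes u =
      [⟨(u.reg .rdi).toNat + 48, (u.reg .rdi).toNat + 56⟩, ⟨(u.reg .rdi).toNat + 84, (u.reg .rdi).toNat + 96⟩,
       ⟨(u.reg .rdi).toNat + 136, (u.reg .rdi).toNat + 144⟩, ⟨(u.reg .rdi).toNat + 1484, (u.reg .rdi).toNat + 1749⟩,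
       ⟨(u.reg .rdi).toNat + 1752, (u.reg .rdi).toNat + 1784⟩,
       ⟨(u.reg .rdx).toNat, (u.reg .rdx).toNat + 4 * decodeLen u.mem (u.reg .rsi).toNat (argInt (u.reg .rcx))⟩] := id rfl

/-- The bytes from `output[0]` to the end of `output[(len' − 1)·step]`: the coarse window of codebook_decode_step's strided
read-modify-writes (0 when `len' = 0`). -/
def stepBytes (len' step : Nat) : Nat :=
  if len' = 0 then 0 else 4 * ((len' - 1) * step + 1)

/-- **residue_decode's strided call fits its window** (CONTRACTS 59, loop 2115): with `step = n / d` (`step·d ≤ n`), `k < step` and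
`len' ≤ d`, the coarse window of `codebook_decode_step(f, book, target + offset + k, n − offset − k, step)` — the floats
`[k, k + (len' − 1)·step]` relative to `target + offset` — lies inside `[0, n)`. -/
theorem stepBytes_fits {len' d step n k : Nat} (hd1 : 1 ≤ d) (hl : len' ≤ d) (hd : step * d ≤ n) (hk : k < step) :
    4 * k + stepBytes len' step ≤ 4 * n := by
  have h1 : step * 1 ≤ step * d := Nat.mul_le_mul_left step hd1
  unfold stepBytes
  split
  · omega
  · next hne =>
    have h2 : (len' - 1) * step ≤ (d - 1) * step := Nat.mul_le_mul_right step (by omega)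
    have h3 : (d - 1) * step + step = d * step := by
      have : d = (d - 1) + 1 := by omega
      calc (d - 1) * step + step = ((d - 1) + 1) * step := (Nat.succ_mul (d - 1) step).symm
        _ = d * step := by rw [← this]
    have h4 : d * step = step * d := Nat.mul_comm d step
    omega

/-- … and the product `(len' − 1)·step` of that call is small (`n ≤ 8192`): no wrap in `imul eax, r15d`. -/
theorem step_product_lt {len' d step n : Nat} (hl : len' ≤ d) (hd : step * d ≤ n) (hn : n ≤ 8192) :
    (len' - 1) * step < 2 ^ 29 := by
  have h2 : (len' - 1) * step ≤ d * step := Nat.mul_le_mul_right step (by omega)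
  have h4 : d * step = step * d := Nat.mul_comm d step
  omega

/-- **`codebook_decode_step(rdi = f, rsi = c, rdx = output, ecx = len, r8d = step)`** (CONTRACTS 57): `len` any int
(residue_decode passes `n − offset − k`, often `≤ 0`), `0 ≤ step`; with `len' = min(len, c.dimensions)`: the floats
`output[i·step]`, `i < len'`, lie inside one live block — stated for the whole range `output[0 .. (len' − 1)·step]`, which is
what residue_decode has (its `[offset, offset + n)`), and `(len' − 1)·step < 2^29` (`imul eax, r15d ; cdqe ; lea [rdx + rax*4]`
do not wrap). Footprint: that range and the reader's windows of `*f`. Stack: 72 + 8 + codebook_decode_start's 432 = 512 bytes. -/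
def codebook_decode_step.spec (others : List Obj) (frames : List (Nat × FrameLayout)) (Blk : Block → Prop) (len : Nat) :
    Spec where
  pre u :=
    BookPre others frames Blk len u ∧
    0 ≤ argInt (u.reg .r8) ∧
    (0 < decodeLen u.mem (u.reg .rsi).toNat (argInt (u.reg .rcx)) →
      (decodeLen u.mem (u.reg .rsi).toNat (argInt (u.reg .rcx)) - 1) * argU32 (u.reg .r8) < 2 ^ 29 ∧
      FloatWindow others frames u.mem (u.reg .rdi).toNat (u.reg .rsi).toNat (u.reg .rdx).toNat
        (stepBytes (decodeLen u.mem (u.reg .rsi).toNat (argInt (u.reg .rcx))) (argU32 (u.reg .r8))))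
  post u v := VectorPost Blk len u v
  frame := 512
  writes u := bookWins (u.reg .rdi).toNat ++
    [⟨(u.reg .rdx).toNat, (u.reg .rdx).toNat +
        stepBytes (decodeLen u.mem (u.reg .rsi).toNat (argInt (u.reg .rcx))) (argU32 (u.reg .r8))⟩]

@[vspec] theorem codebook_decode_step.spec_frame (others : List Obj) (frames : List (Nat × FrameLayout))
    (Blk : Block → Prop) (len : Nat) : (codebook_decode_step.spec others frames Blk len).frame = 512 := id rfl

@[vspec] theorem codebook_decode_step.spec_writes (others : List Obj) (frames : List (Nat × FrameLayout))
    (Blk : Block → Prop) (len : Nat) (u : State) : (codebook_decode_step.spec others frames Blk len).writes u =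
      [⟨(u.reg .rdi).toNat + 48, (u.reg .rdi).toNat + 56⟩, ⟨(u.reg .rdi).toNat + 84, (u.reg .rdi).toNat + 96⟩,
       ⟨(u.reg .rdi).toNat + 136, (u.reg .rdi).toNat + 144⟩, ⟨(u.reg .rdi).toNat + 1484, (u.reg .rdi).toNat + 1749⟩,
       ⟨(u.reg .rdi).toNat + 1752, (u.reg .rdi).toNat + 1784⟩,
       ⟨(u.reg .rdx).toNat, (u.reg .rdx).toNat +
          stepBytes (decodeLen u.mem (u.reg .rsi).toNat (argInt (u.reg .rcx))) (argU32 (u.reg .r8))⟩] := id rfl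

/-- **`residue_decode(rdi = f, rsi = book, rdx = target, ecx = offset, r8d = n, r9d = rtype)`** (CONTRACTS 59): `0 ≤ offset`,
`1 ≤ n`, `offset + n ≤ 8192`; the floats `target[offset .. offset + n)` lie inside one live block (the caller:
`Block(residue_buffers[j], 4·b1)`, `offset + n ≤ actual_size ≤ b1`); `d = book.dimensions ≥ 1` is K1 (FIX 6: the `idiv` and the
progress of `k += d`). `rtype` may be anything (0: the strided arm, else: the contiguous arm). NOT a protected frame (c/FRAMES.txt;
CONTRACTS' generated shadow-clause row of this entry describes decode_residue's frame by mistake). Stack: six pushes,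
`sub rsp, 18H`, a return address, codebook_decode's / codebook_decode_step's 512: 592 bytes. -/
def residue_decode.spec (others : List Obj) (frames : List (Nat × FrameLayout)) (Blk : Block → Prop) (len : Nat) : Spec where
  pre u :=
    BookPre others frames Blk len u ∧
    argU32 (u.reg .rcx) + argU32 (u.reg .r8) ≤ 8192 ∧
    1 ≤ argU32 (u.reg .r8) ∧
    FloatWindow others frames u.mem (u.reg .rdi).toNat (u.reg .rsi).toNat
      ((u.reg .rdx).toNat + 4 * argU32 (u.reg .rcx)) (4 * argU32 (u.reg .r8))
  post u v := VectorPost Blk len u v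
  frame := 592
  writes u := bookWins (u.reg .rdi).toNat ++
    [⟨(u.reg .rdx).toNat + 4 * argU32 (u.reg .rcx),
      (u.reg .rdx).toNat + 4 * argU32 (u.reg .rcx) + 4 * argU32 (u.reg .r8)⟩]

@[vspec] theorem residue_decode.spec_frame (others : List Obj) (frames : List (Nat × FrameLayout)) (Blk : Block → Prop)
    (len : Nat) : (residue_decode.spec others frames Blk len).frame = 592 := id rfl

@[vspec] theorem residue_decode.spec_writes (others : List Obj) (frames : List (Nat × FrameLayout)) (Blk : Block → Prop)
    (len : Nat) (u : State) : (residue_decode.spec others frames Blk len).writes u =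
      [⟨(u.reg .rdi).toNat + 48, (u.reg .rdi).toNat + 56⟩, ⟨(u.reg .rdi).toNat + 84, (u.reg .rdi).toNat + 96⟩,
       ⟨(u.reg .rdi).toNat + 136, (u.reg .rdi).toNat + 144⟩, ⟨(u.reg .rdi).toNat + 1484, (u.reg .rdi).toNat + 1749⟩,
       ⟨(u.reg .rdi).toNat + 1752, (u.reg .rdi).toNat + 1784⟩,
       ⟨(u.reg .rdx).toNat + 4 * argU32 (u.reg .rcx),
        (u.reg .rdx).toNat + 4 * argU32 (u.reg .rcx) + 4 * argU32 (u.reg .r8)⟩] := id rfl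

/-! ### `codebook_decode_deinterleave_repeat` -/

/-- The window `outputs[k][0 .. len)` of codebook_decode_deinterleave_repeat, for the pointer found in the table at entry. -/
def deint.window (mem : Mem) (outputs len k : Nat) : Block :=
  ⟨mem.ptr (outputs + 8 * k), 4 * len⟩

/-- **What the stores of codebook_decode_deinterleave_repeat must not meet** (CONTRACTS 55: "The output blocks are disjoint from
`*f`, `*c`, `c`'s blocks, the outputs array and the two ints"), reduced to what the code and the postcondition need: a float store
into `outputs[k][p]` changes neither `*f` (`Bits f` of the post), nor the struct at `c` (`c->multiplicands`, `c->dimensions`,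
`c->sequence_p` are re-read every round), nor the table `outputs` (`outputs[c_inter]` is re-read for every element), nor the two
ints (result 0: "NOT written"); the two final int stores hit neither `*f` nor each other; and the bit reader's stores into `*f`
(`f->acc`, `f->valid_bits`, the footprint `bookWins f` of prep_huffman, codebook_decode_scalar_raw, error) do not change the table
(`tableObj`, the last field). -/
structure DeintApart (mem : Mem) (f c outputs ch cp pp len : Nat) : Prop where
  ints : (Block.mk cp 4).disjoint (Block.mk pp 4)
  cpObj : (Block.mk cp 4).disjoint (objBlock f)
  ppObj : (Block.mk pp 4).disjoint (objBlock f)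
  winObj : ∀ k, k < ch → mem.ptr (outputs + 8 * k) ≠ 0 → (deint.window mem outputs len k).disjoint (objBlock f)
  winBook : ∀ k, k < ch → mem.ptr (outputs + 8 * k) ≠ 0 → (deint.window mem outputs len k).disjoint (Codebook.block c)
  /-- … nor the `sorted_values` block (K4's sentinel, K4c): the next round's codebook_decode_scalar_raw needs `CodebookOK c` in the
  memory after the float stores (the caller: `Separated.buf`) -/
  winSv : ∀ k, k < ch → mem.ptr (outputs + 8 * k) ≠ 0 → 1 ≤ Codebook.sorted_entries mem c →
    (deint.window mem outputs len k).disjoint (Codebook.svBlock mem c)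
  winTable : ∀ k, k < ch → mem.ptr (outputs + 8 * k) ≠ 0 →
    (deint.window mem outputs len k).disjoint (Block.mk outputs (8 * ch))
  winCp : ∀ k, k < ch → mem.ptr (outputs + 8 * k) ≠ 0 → (deint.window mem outputs len k).disjoint (Block.mk cp 4)
  winPp : ∀ k, k < ch → mem.ptr (outputs + 8 * k) ≠ 0 → (deint.window mem outputs len k).disjoint (Block.mk pp 4)
  /-- THE TABLE OF OUTPUT POINTERS IS DISJOINT FROM `*f`: every round stores into `f->acc` / `f->valid_bits` (0x10dea2, 0x10dec2,
  0x10dc52) and calls prep_huffman, codebook_decode_scalar_raw, error (footprint `bookWins f`), and re-reads `outputs[c_inter]`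
  afterwards (0x10dd16, 0x10ddc1): without this clause `outputs = f + 1764` (the qword `acc`, `valid_bits`) satisfies everything
  else and the re-read pointer is garbage. The caller: `outputs` = `residue_buffers` is an array of a caller's stack frame
  (`DecodeResidue.Args.rb_stack`), `*f` an arena block off the stack (`DecodeInv.objOff`): `DecodeResidue.Entered.deint_tableObj`. -/
  tableObj : (Block.mk outputs (8 * ch)).disjoint (objBlock f)

/-- **The precondition of `codebook_decode_deinterleave_repeat(rdi = f, rsi = c, rdx = outputs, ecx = ch, r8 = c_inter_p,
r9 = p_inter_p, [rsp + 8] = len, [rsp + 16] = total_decode)`** (CONTRACTS 55). The two stack arguments are read as DWORDS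
(`imul esi, DWORD PTR [rsp+70H]`, `cmp DWORD PTR [rsp+78H], 0`): only their low halves matter. -/
structure DeintPre (others : List Obj) (frames : List (Nat × FrameLayout)) (Blk : Block → Prop) (len : Nat) (u : State) :
    Prop where
  /-- `Bits f`; `CodebookOK c` (K1 `dimensions ≥ 1`, K3, K4, K5, K6) -/
  book : BookPre others frames Blk len u
  /-- THE TWO ARGUMENT SLOTS ARE CLEAN STACK: the layer holds with the clean region ending at the caller's stack pointer BEFORE it
  pushed the two arguments. So no live object meets `[rsp + 8, rsp + 24)`: the in-place `total_decode -= effective`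
  (0x10de04 `sub [rsp+78H], r15d`) changes nothing the function or its caller reads. (It implies `book.reader.shadow.inv`.) -/
  args : ShadowInv others frames ((u.reg .rsp).toNat + 24) u.mem
  /-- `1 ≤ ch ≤ 16` -/
  ch_pos : 1 ≤ argU32 (u.reg .rcx)
  ch_le : argU32 (u.reg .rcx) ≤ 16
  /-- `0 ≤ len ≤ 4096` -/
  len_le : u.mem.u32 ((u.reg .rsp).toNat + 8) ≤ 4096
  /-- `total_decode ≥ 1` -/
  total_pos : 1 ≤ u.mem.i32 ((u.reg .rsp).toNat + 16)
  /-- `Live(c_inter_p, 4)`, `Live(p_inter_p, 4)` -/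
  cpSite : Site (Live (stackObjs frames ++ others)) (u.reg .r8).toNat 4
  ppSite : Site (Live (stackObjs frames ++ others)) (u.reg .r9).toNat 4
  /-- CI: `0 ≤ *c_inter_p < ch`, `0 ≤ *p_inter_p`, `*p_inter_p · ch + *c_inter_p ≤ len · ch` (NOT `pos + total_decode ≤ len·ch`) -/
  inter : InterAt u.mem (u.reg .r8).toNat (u.reg .r9).toNat (argU32 (u.reg .rcx)) (u.mem.u32 ((u.reg .rsp).toNat + 8))
  /-- `Live(outputs, 8·ch)` -/
  table : Site (Live (stackObjs frames ++ others)) (u.reg .rdx).toNat (8 * argU32 (u.reg .rcx))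
  /-- `∀ k < ch: outputs[k] = NULL ∨ Block(outputs[k], ≥ 4·len)` -/
  outs : ∀ k, k < argU32 (u.reg .rcx) → u.mem.ptr ((u.reg .rdx).toNat + 8 * k) = 0 ∨
    ∃ sz, 4 * u.mem.u32 ((u.reg .rsp).toNat + 8) ≤ sz ∧ Blk ⟨u.mem.ptr ((u.reg .rdx).toNat + 8 * k), sz⟩
  apart : DeintApart u.mem (u.reg .rdi).toNat (u.reg .rsi).toNat (u.reg .rdx).toNat (argU32 (u.reg .rcx))
    (u.reg .r8).toNat (u.reg .r9).toNat (u.mem.u32 ((u.reg .rsp).toNat + 8))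

/-- **The postcondition of codebook_decode_deinterleave_repeat** (CONTRACTS 55): eax ∈ {0, 1}. eax = 1: `*c_inter_p`,
`*p_inter_p` updated and CI holds again. eax = 0: the two ints are NOT written (lookup_type = 0 → error 21; `z < 0` → FALSE or
error 21; FIX 10 → FALSE). `Bits f` kept (V1: DECODE stores `valid_bits − n`, then 0 if negative), μ not increased. -/
structure DeintPost (Blk : Block → Prop) (len : Nat) (u v : State) : Prop where
  untouched : ShadowUntouched u.mem v.mem
  reader : ReaderPost Blk len u.mem v.mem (u.reg .rdi).toNat
  result : v.reg .rax = 0 ∨ v.reg .rax = 1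
  one : v.reg .rax = 1 →
    InterAt v.mem (u.reg .r8).toNat (u.reg .r9).toNat (argU32 (u.reg .rcx)) (u.mem.u32 ((u.reg .rsp).toNat + 8))
  zero : v.reg .rax = 0 →
    v.mem.i32 (u.reg .r8).toNat = u.mem.i32 (u.reg .r8).toNat ∧ v.mem.i32 (u.reg .r9).toNat = u.mem.i32 (u.reg .r9).toNat

/-- The footprint of codebook_decode_deinterleave_repeat besides its stack frame: the reader's windows of `*f`, the two ints,
ITS OWN ARGUMENT SLOT `total_decode` (`[rsp + 16, rsp + 20)` of the entry state: ABOVE the return address, decremented in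
place), and `outputs[k][0 .. len)` for every `k < ch` WHOSE POINTER `outputs[k]` IS NOT NULL (CONTRACTS 55: "only non-NULL
outputs[k]"). A NULL pointer contributes NO window: the code stores a float only behind `if (outputs[c_inter])` (`test rax, rax ;
je` at 0x10dd19 / 0x10ddc4), and the caller decode_residue really passes NULL for its do_not_decode channels, whose own footprint
has nothing below 100000H (`DecodeResidue.Entered.deint_wins_inside`). A window of the list:
`List.mem_map.mpr ⟨k, List.mem_filter.mpr ⟨List.mem_range.mpr hk, decide_eq_true hnz⟩, rfl⟩` (`deint.mem_wins_window`). -/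
def deint.wins (u : State) : List Span :=
  bookWins (u.reg .rdi).toNat ++
  [⟨(u.reg .r8).toNat, (u.reg .r8).toNat + 4⟩, ⟨(u.reg .r9).toNat, (u.reg .r9).toNat + 4⟩,
   ⟨(u.reg .rsp).toNat + 16, (u.reg .rsp).toNat + 20⟩] ++
  ((List.range (argU32 (u.reg .rcx))).filter (fun k => decide (u.mem.ptr ((u.reg .rdx).toNat + 8 * k) ≠ 0))).map
    (fun k => (deint.window u.mem (u.reg .rdx).toNat (u.mem.u32 ((u.reg .rsp).toNat + 8)) k).span)

/-- **A non-NULL output window is a window of the footprint**: `k < ch` and `outputs[k] ≠ NULL` at the entry state. -/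
theorem deint.wins_window_mem {u : State} {k : Nat} (hk : k < argU32 (u.reg .rcx))
    (hnz : u.mem.ptr ((u.reg .rdx).toNat + 8 * k) ≠ 0) :
    (deint.window u.mem (u.reg .rdx).toNat (u.mem.u32 ((u.reg .rsp).toNat + 8)) k).span ∈ deint.wins u := by
  unfold deint.wins
  apply List.mem_append_right
  exact List.mem_map.mpr ⟨k, List.mem_filter.mpr ⟨List.mem_range.mpr hk, decide_eq_true hnz⟩, rfl⟩

/-- **The windows of `deint.wins`, one by one** (for a caller that has to place each inside its own footprint): a window of the
reader (`bookWins f`), `*c_inter_p`, `*p_inter_p`, the argument slot `total_decode`, or the window `[outputs[k], outputs[k] + 4·len)`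
of a `k < ch` with `outputs[k] ≠ NULL`. -/
theorem deint.wins_cases {u : State} {w : Span} (hw : w ∈ deint.wins u) :
    w ∈ bookWins (u.reg .rdi).toNat ∨
    w = ⟨(u.reg .r8).toNat, (u.reg .r8).toNat + 4⟩ ∨
    w = ⟨(u.reg .r9).toNat, (u.reg .r9).toNat + 4⟩ ∨
    w = ⟨(u.reg .rsp).toNat + 16, (u.reg .rsp).toNat + 20⟩ ∨
    ∃ k, k < argU32 (u.reg .rcx) ∧ u.mem.ptr ((u.reg .rdx).toNat + 8 * k) ≠ 0 ∧
      w = ⟨u.mem.ptr ((u.reg .rdx).toNat + 8 * k),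
           u.mem.ptr ((u.reg .rdx).toNat + 8 * k) + 4 * u.mem.u32 ((u.reg .rsp).toNat + 8)⟩ := by
  unfold deint.wins at hw
  rcases List.mem_append.mp hw with hw1 | hw2
  · rcases List.mem_append.mp hw1 with hb | hi
    · exact Or.inl hb
    · simp only [List.mem_cons, List.not_mem_nil, or_false] at hi
      rcases hi with h1 | h2 | h3
      · exact Or.inr (Or.inl h1)
      · exact Or.inr (Or.inr (Or.inl h2))
      · exact Or.inr (Or.inr (Or.inr (Or.inl h3)))
  · obtain ⟨k, hkm, hkw⟩ := List.mem_map.mp hw2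
    obtain ⟨hkr, hkd⟩ := List.mem_filter.mp hkm
    refine Or.inr (Or.inr (Or.inr (Or.inr ⟨k, List.mem_range.mp hkr, of_decide_eq_true hkd, ?_⟩)))
    rw [← hkw]
    rfl

/-- **`codebook_decode_deinterleave_repeat`** (CONTRACTS 55; FIX 5, FIX 10). Loop 1901 `while (total_decode > 0)`: measure
`total_decode` (down by `effective ≥ 1` per round). Stack: six pushes, `sub rsp, 38H`, a return address,
codebook_decode_scalar_raw's 384: 496 bytes. No shadow byte is written. -/
def codebook_decode_deinterleave_repeat.spec (others : List Obj) (frames : List (Nat × FrameLayout)) (Blk : Block → Prop)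
    (len : Nat) : Spec where
  pre u := DeintPre others frames Blk len u
  post u v := DeintPost Blk len u v
  frame := 496
  writes u := deint.wins u

@[vspec] theorem codebook_decode_deinterleave_repeat.spec_frame (others : List Obj) (frames : List (Nat × FrameLayout))
    (Blk : Block → Prop) (len : Nat) : (codebook_decode_deinterleave_repeat.spec others frames Blk len).frame = 496 := id rfl

@[vspec] theorem codebook_decode_deinterleave_repeat.spec_writes (others : List Obj) (frames : List (Nat × FrameLayout))
    (Blk : Block → Prop) (len : Nat) (u : State) :
    (codebook_decode_deinterleave_repeat.spec others frames Blk len).writes u = deint.wins u := id rfl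

/-! ### Segmented functions: what every cut-point assertion shares -/

/-- **The frame facts of a state `v` inside a function that was entered at `e`** (with return address `ret`) and has pushed r15
r14 r13 r12 rbp rbx — all three segmented functions of this file do — and lowered rsp to `sp` (a literal offset from `e.rsp`: the
slots below are spelled the way the walker normalises `[rsp + k]`, as `e.reg .rsp - n`):
the entry facts (`AtEntry`: alignment, room, the return address below 1 GB), the return address and the six saved registers still
in their slots, the memory changed only inside the contract's footprint, the image's text unchanged (`CodeOK`), DF = 0 and the
MXCSR masks (`abiInv`), no shadow byte written since the entry. An assertion `….At… v` = `v.rip = L.<fn>.cut<k>` ∧ `Mid` ∧ the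
registers / slots that hold ghost values ∧ the invariant at that point. The LAST segment turns `Mid` into `Returned`.
HOW A SEGMENT'S PROOF STARTS AND ENDS (validated on codebook_decode_scalar_raw.4, a complete proof: S3's
worked/codebook_decode_scalar_raw_4.Proof.lean): `obtain` the fields of the assertion and of `Mid`; `v_entry he` on `Mid.atEntry`
(he_room, he_top, he_stack …); `hmid.code` IS the walker's span fact `Mem.EqOn L.textLo L.textHi u₀.mem u.mem` (`HasCodeNat` is about
`u₀`); DF / MXCSR / `SseOK` from `hmid.inv`; then `u_walk hcode [hμ.vendor] … span [L.textLo, L.textHi] side (v_side)`: the slot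
facts are found by the pops and the `ret`. At the `ret`, `v_returned` closes rip, rsp, code, inv and leaves post, saved, same (its
`u_saved` / `u_same` assume that the walk began at the entry state): saved by `intro r hr; cases r <;> first | exact absurd hr
(by decide) | with_reducible assumption`, same by `rw [w_mem]` and `Mid.same` composed with the segment's own stores. -/
structure Mid (u₀ : State) (s : Spec) (entry ret : Word) (e : State) (sp : Word) (v : State) : Prop where
  atEntry : AtEntry (conv u₀) entry s.frame ret e
  rsp : v.reg .rsp = sp
  ra : UInt64.ofNat (v.mem.readLE (e.reg .rsp) 8) = ret
  r15 : UInt64.ofNat (v.mem.readLE (e.reg .rsp - 8) 8) = e.reg .r15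
  r14 : UInt64.ofNat (v.mem.readLE (e.reg .rsp - 16) 8) = e.reg .r14
  r13 : UInt64.ofNat (v.mem.readLE (e.reg .rsp - 24) 8) = e.reg .r13
  r12 : UInt64.ofNat (v.mem.readLE (e.reg .rsp - 32) 8) = e.reg .r12
  rbp : UInt64.ofNat (v.mem.readLE (e.reg .rsp - 40) 8) = e.reg .rbp
  rbx : UInt64.ofNat (v.mem.readLE (e.reg .rsp - 48) 8) = e.reg .rbx
  same : Mem.SameExcept (s.footprint e) e.mem v.mem
  code : CodeOK u₀ v.mem
  inv : abiInv v
  untouched : ShadowUntouched e.mem v.mem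

end Vorbis.Spec
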